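-- pv_equiv track=rewrite | github.com/broadtask/clinicaltrials | python_anywhere/clinical_trial_post_process.py | get_country_status
-- ===== SOURCE A (Python) =====
-- def get_country_status(data):
--
--     country_list = []
--
--     for each_data in data:
--
--         if each_data["country"] != "":
--             country_list.append(each_data["country"])
--
--     if len(country_list) == 0:
--         return ""
--     else:
--         if "United States" in country_list:
--             return "United States"
--         else:
--             return country_list[0]
-- ===== SOURCE B (Python) =====
-- def get_country_status(data):
--     us_seen = False
--     first = None
--     for each_data in data:
--         c = each_data["country"]
--         if c == "United States":
--             us_seen = True
--         if first is None and c != "":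
--             first = c
--     if first is None:
--         return ""
--     return "United States" if us_seen else first
-- ===== Notes on version B (the rewrite author's own statement) =====
-- stated objective: alternative
-- what changed: Replaces A's build-a-list-then-membership-scan-then-index (two traversals and an O(n) intermediate list) with a single pass keeping only two scalars: a us_seen flag and the first non-empty country.
import Mathlib
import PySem

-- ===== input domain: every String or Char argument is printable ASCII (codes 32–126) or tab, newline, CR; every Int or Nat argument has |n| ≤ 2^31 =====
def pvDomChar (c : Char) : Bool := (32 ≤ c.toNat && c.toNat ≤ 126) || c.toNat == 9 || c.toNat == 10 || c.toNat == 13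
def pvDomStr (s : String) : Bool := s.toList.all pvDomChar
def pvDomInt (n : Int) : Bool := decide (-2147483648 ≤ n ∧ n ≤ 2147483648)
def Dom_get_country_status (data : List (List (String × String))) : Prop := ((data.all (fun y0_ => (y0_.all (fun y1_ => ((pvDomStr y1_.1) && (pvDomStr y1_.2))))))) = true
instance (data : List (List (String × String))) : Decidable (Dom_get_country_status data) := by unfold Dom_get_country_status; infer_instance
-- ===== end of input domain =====

-- B does one pass keeping two scalars (us_seen flag + first non-empty country) instead of A's
-- intermediate list followed by a membership scan and an index; same cost class, O(1) extra space.

-- ===== PORT A =====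
-- each_data["country"]: first-match lookup in the association list (Python dict access).
-- Outside Pre_ (key missing) Python raises KeyError; there this helper returns "" (unclaimed).
def pvCountryOf (r : List (String × String)) : String :=
  ((r.find? (fun p => p.1 == "country")).map Prod.snd).getD ""

def get_country_status (data : List (List (String × String))) : String :=
  let country_list := data.foldl
    (fun acc r => if pvCountryOf r ≠ "" then acc ++ [pvCountryOf r] else acc) []
  if country_list.length = 0 then ""
  else if country_list.contains "United States" then "United States"
  else country_list.headD ""

-- ===== PORT B =====
def pvStepB (st : Bool × Option String) (r : List (String × String)) : Bool × Option String :=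
  let c := pvCountryOf r
  let st1 := if c == "United States" then (true, st.2) else st
  if st1.2.isNone ∧ c ≠ "" then (st1.1, some c) else st1

def get_country_status_alt (data : List (List (String × String))) : String :=
  let st := data.foldl pvStepB (false, none)
  match st.2 with
  | none => ""
  | some first => if st.1 then "United States" else first

-- ===== PRECONDITION & SPEC =====
-- Pre_ excludes exactly the records lacking the key "country", on which Python A raises KeyError.
def Pre_get_country_status (data : List (List (String × String))) : Prop :=
  (data.all (fun r => r.any (fun p => p.1 == "country"))) = true
instance (data : List (List (String × String))) : Decidable (Pre_get_country_status data) := by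
  unfold Pre_get_country_status; infer_instance

def pvWitness_get_country_status : (List (List (String × String))) :=
  [[("country", "France")], [("country", "United States")]]

def Spec_get_country_status (data : List (List (String × String))) (out : String) : Prop := out = get_country_status_alt data
instance (data : List (List (String × String))) (out : String) : Decidable (Spec_get_country_status data out) := by unfold Spec_get_country_status; infer_instance

-- ===== CLAIM (what is proved, stated in full; the proofs are below) =====
def Claim_equal_get_country_status : Prop := ∀ (data : List (List (String × String))), Dom_get_country_status data → Pre_get_country_status data → Spec_get_country_status data (get_country_status data)

-- ===== LEMMAS AND PROOFS =====

-- Loop invariant: B's fold state is (membership of "United States", head) of A's accumulated list.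
lemma pvFoldInv (data : List (List (String × String))) :
    ∀ acc : List String,
      data.foldl pvStepB (acc.contains "United States", acc.head?) =
        ((data.foldl (fun a r => if pvCountryOf r ≠ "" then a ++ [pvCountryOf r] else a) acc).contains "United States",
         (data.foldl (fun a r => if pvCountryOf r ≠ "" then a ++ [pvCountryOf r] else a) acc).head?) := by
  induction data with
  | nil => intro acc; simp
  | cons r rest ih =>
    intro acc
    have hstep : pvStepB (acc.contains "United States", acc.head?) r =
        (((if pvCountryOf r ≠ "" then acc ++ [pvCountryOf r] else acc)).contains "United States",
         ((if pvCountryOf r ≠ "" then acc ++ [pvCountryOf r] else acc)).head?) := by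
      simp only [pvStepB]
      by_cases hus : pvCountryOf r = "United States"
      · have hne : pvCountryOf r ≠ "" := by rw [hus]; decide
        simp only [hus]
        cases acc with
        | nil => simp
        | cons x xs => simp
      · simp only [beq_iff_eq, hus]
        by_cases hne : pvCountryOf r = ""
        · simp [hne]
        · cases acc with
          | nil => simp [hne, Ne.symm hus]
          | cons x xs => simp [hne, Ne.symm hus]
    simp only [List.foldl_cons, hstep]
    exact ih _
  
lemma pvPortsAgree (data : List (List (String × String))) :
    get_country_status data = get_country_status_alt data := by
  have h := pvFoldInv data []
  simp only [List.contains, List.elem_nil] at h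
  simp only [get_country_status, get_country_status_alt]
  rw [show ((false, (none : Option String)) = (([] : List String).contains "United States", ([] : List String).head?)) by simp, pvFoldInv data []]
  set L := data.foldl (fun a r => if pvCountryOf r ≠ "" then a ++ [pvCountryOf r] else a) [] with hL
  cases L with
  | nil => simp
  | cons x xs =>
    simp

-- ===== VERDICT (by name: the statement is the Claim_ definition above) =====
theorem get_country_status_spec : Claim_equal_get_country_status := by
  intro data _ _
  unfold Spec_get_country_status
  exact pvPortsAgree data
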